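-- pv_equiv track=rewrite | github.com/OrganicArtsLLC/chipforge | songs/classical/005_bolero_v4.py | theme_to_midi_sequence
-- ===== SOURCE A (Python) =====
-- def theme_to_midi_sequence(theme: list, total_steps: int) -> list[int]:
--     """Convert theme data to step-by-step MIDI list (0=rest) for counterpoint."""
--     sequence = [0] * total_steps
--     for (step, midi, dur) in theme:
--         if step < total_steps:
--             sequence[step] = midi
--             # Fill held notes so counterpoint has context
--             for d in range(1, min(dur, total_steps - step)):
--                 if step + d < total_steps:
--                     sequence[step + d] = midi
--     return sequence
-- ===== SOURCE B (Python) =====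
-- def theme_to_midi_sequence(theme: list, total_steps: int) -> list[int]:
--     """Convert theme data to step-by-step MIDI list (0=rest) for counterpoint."""
--     seq = [None] * total_steps
--     remaining = len(seq)  # cells still unpainted
--     # Walk the theme backwards: the last note painting a cell wins, so the
--     # first writer in reverse order wins; stop as soon as every cell is painted.
--     for (step, midi, dur) in reversed(theme):
--         if remaining == 0:
--             break
--         if step < total_steps:
--             if seq[step] is None:
--                 seq[step] = midi
--                 remaining -= 1
--             for d in range(1, min(dur, total_steps - step)):
--                 if seq[step + d] is None:
--                     seq[step + d] = midi
--                     remaining -= 1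
--     return [0 if v is None else v for v in seq]
-- ===== Notes on version B (the rewrite author's own statement) =====
-- stated objective: alternative
-- what changed: B walks the theme in reverse and writes each cell at most once (first write in reverse order = last write in theme order, unpainted cells tracked as None), keeping a count of unpainted cells so the loop stops once the whole sequence is painted, instead of A's forward pass that re-paints every held cell of every note.
import Mathlib
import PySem

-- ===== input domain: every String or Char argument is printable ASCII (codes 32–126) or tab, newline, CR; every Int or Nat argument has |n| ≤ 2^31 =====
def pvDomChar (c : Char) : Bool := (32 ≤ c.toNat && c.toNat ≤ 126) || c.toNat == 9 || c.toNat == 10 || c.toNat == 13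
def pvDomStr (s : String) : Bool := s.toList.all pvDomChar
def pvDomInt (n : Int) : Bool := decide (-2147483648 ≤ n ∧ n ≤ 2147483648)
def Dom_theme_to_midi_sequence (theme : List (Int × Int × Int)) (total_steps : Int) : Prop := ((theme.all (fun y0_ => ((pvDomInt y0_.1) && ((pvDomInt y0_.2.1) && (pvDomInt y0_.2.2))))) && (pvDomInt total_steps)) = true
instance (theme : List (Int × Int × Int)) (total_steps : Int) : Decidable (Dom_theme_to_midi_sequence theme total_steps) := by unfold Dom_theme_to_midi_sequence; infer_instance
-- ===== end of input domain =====

-- B walks the theme in reverse with first-write-wins into unpainted (None) cells and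
-- stops as soon as every cell is painted; same return value as A's forward overwriting.

-- ===== PORT A =====
-- inner loop `for d in range(1, min(dur, total_steps - step)): if step + d < total_steps: sequence[step + d] = midi`
def paintHold (total_steps s m dur : Int) (seq : List Int) : List Int :=
  (PySem.List.pyRange 1 (min dur (total_steps - s)) 1).foldl
    (fun sq d => if s + d < total_steps then PySem.List.pySetD sq (s + d) m else sq) seq

-- one iteration of the outer `for (step, midi, dur) in theme` loop
-- (`sequence[step] = midi`; pySetD is exact for every index Pre_ admits — an
--  out-of-range index is a Python IndexError, excluded by Pre_)
def paintNote (total_steps : Int) (seq : List Int) (n : Int × Int × Int) : List Int :=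
  if n.1 < total_steps then
    paintHold total_steps n.1 n.2.1 n.2.2 (PySem.List.pySetD seq n.1 n.2.1)
  else seq

def theme_to_midi_sequence (theme : List (Int × Int × Int)) (total_steps : Int) : List Int :=
  theme.foldl (paintNote total_steps) (List.replicate total_steps.toNat 0)

-- ===== PORT B =====
-- `if seq[i] is None: seq[i] = m; remaining -= 1`   (state = (seq, remaining);
--  pyGet? is none exactly where Python raises IndexError, excluded by Pre_)
def altPaint (st : List (Option Int) × Int) (i m : Int) : List (Option Int) × Int :=
  match PySem.List.pyGet? st.1 i with
  | some none => (PySem.List.pySetD st.1 i (some m), st.2 - 1)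
  | _ => st

-- body of B's `for` loop for one (step, midi, dur)
def altNote (total_steps : Int) (st : List (Option Int) × Int) (n : Int × Int × Int) :
    List (Option Int) × Int :=
  if n.1 < total_steps then
    (PySem.List.pyRange 1 (min n.2.2 (total_steps - n.1)) 1).foldl
      (fun s d => altPaint s (n.1 + d) n.2.1) (altPaint st n.1 n.2.1)
  else st

-- B's loop over reversed(theme) with the `if remaining == 0: break` early exit
def altLoop (total_steps : Int) : List (Int × Int × Int) → List (Option Int) × Int → List (Option Int) × Int
  | [], st => st
  | n :: rest, st =>
    if st.2 = 0 then st
    else altLoop total_steps rest (altNote total_steps st n)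

def theme_to_midi_sequence_alt (theme : List (Int × Int × Int)) (total_steps : Int) : List Int :=
  let seq : List (Option Int) := List.replicate total_steps.toNat none
  (altLoop total_steps theme.reverse (seq, (seq.length : Int))).1.map (fun v => v.getD 0)

-- ===== PRECONDITION & SPEC =====
-- Pre_ excludes exactly the inputs on which Python A raises IndexError: a note whose
-- start step is painted (step < total_steps) but indexes outside [0]*total_steps,
-- i.e. step < -total_steps (for total_steps ≥ 0), or any painted note when total_steps < 0.
def Pre_theme_to_midi_sequence (theme : List (Int × Int × Int)) (total_steps : Int) : Prop :=
  ∀ n ∈ theme, total_steps ≤ n.1 ∨ (0 ≤ total_steps ∧ -total_steps ≤ n.1)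
instance (theme : List (Int × Int × Int)) (total_steps : Int) : Decidable (Pre_theme_to_midi_sequence theme total_steps) := by unfold Pre_theme_to_midi_sequence; infer_instance
def pvWitness_theme_to_midi_sequence : (List (Int × Int × Int)) × Int := ([(0, 60, 2), (-1, 7, 1)], 4)

def Spec_theme_to_midi_sequence (theme : List (Int × Int × Int)) (total_steps : Int) (out : List Int) : Prop := out = theme_to_midi_sequence_alt theme total_steps
instance (theme : List (Int × Int × Int)) (total_steps : Int) (out : List Int) : Decidable (Spec_theme_to_midi_sequence theme total_steps out) := by unfold Spec_theme_to_midi_sequence; infer_instance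

-- ===== CLAIM (what is proved, stated in full; the proofs are below) =====
def Claim_equal_theme_to_midi_sequence : Prop := ∀ (theme : List (Int × Int × Int)) (total_steps : Int), Dom_theme_to_midi_sequence theme total_steps → Pre_theme_to_midi_sequence theme total_steps → Spec_theme_to_midi_sequence theme total_steps (theme_to_midi_sequence theme total_steps)

-- ===== LEMMAS AND PROOFS =====

-- `wrTo T len n k` : note n writes (possibly through Python's negative-index rule) cell k
-- of a length-len sequence; the inserted 0 stands for the `sequence[step] = midi` write.
def wrTo (T : Int) (len : Nat) (n : Int × Int × Int) (k : Nat) : Bool :=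
  decide (n.1 < T) &&
    (0 :: PySem.List.pyRange 1 (min n.2.2 (T - n.1)) 1).any
      (fun dd => decide (PySem.List.pyIdx? len (n.1 + dd) = some k))

-- the LAST note of ns writing cell k (A's forward overwriting order; head processed first)
def wins (T : Int) (len : Nat) (k : Nat) : List (Int × Int × Int) → Option Int
  | [] => none
  | n :: ns => (wins T len k ns).or (if wrTo T len n k then some n.2.1 else none)

-- the FIRST note of ns writing cell k (B's first-write-wins order)
def fw (T : Int) (len : Nat) (k : Nat) : List (Int × Int × Int) → Option Int
  | [] => none
  | n :: rest => if wrTo T len n k then some n.2.1 else fw T len k rest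

-- number of unpainted cells, as an Int (B's `remaining` counter)
def cN (o : List (Option Int)) : Int := (o.countP (fun v => v.isNone) : Int)

lemma wins_nil (T : Int) (len : Nat) (k : Nat) : wins T len k [] = none := rfl
lemma wins_cons (T : Int) (len : Nat) (k : Nat) (n : Int × Int × Int) (ns : List (Int × Int × Int)) :
    wins T len k (n :: ns) = (wins T len k ns).or (if wrTo T len n k then some n.2.1 else none) := rfl
lemma fw_nil (T : Int) (len : Nat) (k : Nat) : fw T len k [] = none := rfl
lemma fw_cons (T : Int) (len : Nat) (k : Nat) (n : Int × Int × Int) (ns : List (Int × Int × Int)) :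
    fw T len k (n :: ns) = if wrTo T len n k then some n.2.1 else fw T len k ns := rfl

lemma pyIdx?_some_lt {len : Nat} {i : Int} {k : Nat}
    (h : PySem.List.pyIdx? len i = some k) : k < len := by
  unfold PySem.List.pyIdx? at h
  split_ifs at h <;> simp_all <;> omega

lemma pySetD_getElem? {α : Type} (xs : List α) (i : Int) (v : α) (k : Nat) :
    (PySem.List.pySetD xs i v)[k]? =
      if PySem.List.pyIdx? xs.length i = some k then some v else xs[k]? := by
  unfold PySem.List.pySetD PySem.List.pySet?
  rcases h : PySem.List.pyIdx? xs.length i with _ | j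
  · simp
  · have hj : j < xs.length := pyIdx?_some_lt h
    simp [List.getElem?_set]
    rcases eq_or_ne j k with rfl | hne
    · simp [hj]
    · simp [hne]

lemma pyGet?_eq_of_pyIdx {α : Type} {xs : List α} {i : Int} {j : Nat}
    (h : PySem.List.pyIdx? xs.length i = some j) :
    PySem.List.pyGet? xs i = xs[j]? := by
  unfold PySem.List.pyGet?; rw [h]; rfl

lemma pyGet?_eq_none_of_pyIdx {α : Type} {xs : List α} {i : Int}
    (h : PySem.List.pyIdx? xs.length i = none) :
    PySem.List.pyGet? xs i = none := by
  unfold PySem.List.pyGet?; rw [h]; rfl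

lemma pySetD_eq_set_of_pyIdx {α : Type} {xs : List α} {i : Int} {j : Nat} (v : α)
    (h : PySem.List.pyIdx? xs.length i = some j) :
    PySem.List.pySetD xs i v = xs.set j v := by
  unfold PySem.List.pySetD PySem.List.pySet?; rw [h]; rfl

-- ---------- A side ----------

lemma length_holdFold (T s m : Int) :
    ∀ (ds : List Int) (seq : List Int),
      (ds.foldl (fun sq d => if s + d < T then PySem.List.pySetD sq (s + d) m else sq) seq).length
        = seq.length := by
  intro ds
  induction ds with
  | nil => intro seq; rfl
  | cons d ds ih =>
    intro seq
    simp only [List.foldl_cons]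
    rw [ih]
    split <;> simp [PySem.List.length_pySetD]

lemma get_holdFold (T s m : Int) :
    ∀ (ds : List Int) (seq : List Int) (k : Nat),
      (ds.foldl (fun sq d => if s + d < T then PySem.List.pySetD sq (s + d) m else sq) seq)[k]? =
        if ds.any (fun dd => decide (s + dd < T) && decide (PySem.List.pyIdx? seq.length (s + dd) = some k))
        then some m else seq[k]? := by
  intro ds
  induction ds with
  | nil => intro seq k; simp
  | cons d ds ih =>
    intro seq k
    simp only [List.foldl_cons, List.any_cons]
    by_cases hd : s + d < T
    · simp only [if_pos hd]
      rw [ih, PySem.List.length_pySetD, pySetD_getElem?]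
      by_cases hidx : PySem.List.pyIdx? seq.length (s + d) = some k <;> simp [hd, hidx]
    · simp only [if_neg hd]
      rw [ih]
      simp [hd]

lemma length_paintNote (T : Int) (seq : List Int) (n : Int × Int × Int) :
    (paintNote T seq n).length = seq.length := by
  unfold paintNote
  split
  · unfold paintHold; rw [length_holdFold, PySem.List.length_pySetD]
  · rfl

lemma any_range_guard (T s : Int) (len : Nat) (dur : Int) (k : Nat) :
    ((PySem.List.pyRange 1 (min dur (T - s)) 1).any
        (fun dd => decide (s + dd < T) && decide (PySem.List.pyIdx? len (s + dd) = some k)))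
      = ((PySem.List.pyRange 1 (min dur (T - s)) 1).any
        (fun dd => decide (PySem.List.pyIdx? len (s + dd) = some k))) := by
  refine Bool.eq_iff_iff.mpr ?_
  simp only [List.any_eq_true, Bool.and_eq_true, decide_eq_true_eq]
  constructor
  · rintro ⟨dd, hdd, _, h2⟩
    exact ⟨dd, hdd, h2⟩
  · rintro ⟨dd, hdd, h2⟩
    have hb := (PySem.List.mem_pyRange_one.mp hdd).2
    exact ⟨dd, hdd, by omega, h2⟩

lemma get_paintNote (T : Int) (seq : List Int) (n : Int × Int × Int) (k : Nat) :
    (paintNote T seq n)[k]? = if wrTo T seq.length n k then some n.2.1 else seq[k]? := by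
  unfold paintNote wrTo
  by_cases hs : n.1 < T
  · simp only [if_pos hs]
    unfold paintHold
    rw [get_holdFold, PySem.List.length_pySetD, pySetD_getElem?, any_range_guard]
    simp only [List.any_cons, add_zero]
    by_cases h0 : PySem.List.pyIdx? seq.length n.1 = some k <;>
      by_cases ha : ((PySem.List.pyRange 1 (min n.2.2 (T - n.1)) 1).any
          fun dd => decide (PySem.List.pyIdx? seq.length (n.1 + dd) = some k)) = true <;>
        simp [hs, h0, ha]
  · simp [hs]

lemma foldA_char (T : Int) :
    ∀ (ns : List (Int × Int × Int)) (seq : List Int) (k : Nat),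
      (ns.foldl (paintNote T) seq)[k]? = (wins T seq.length k ns).or seq[k]? := by
  intro ns
  induction ns with
  | nil => intro seq k; simp [wins_nil]
  | cons n ns ih =>
    intro seq k
    simp only [List.foldl_cons]
    rw [ih, length_paintNote, get_paintNote, wins_cons]
    cases hw : wins T seq.length k ns <;>
      by_cases h : wrTo T seq.length n k = true <;> simp [h, hw]

lemma wins_eq_none_of_le (T : Int) (len : Nat) (k : Nat) (hk : len ≤ k) :
    ∀ (ns : List (Int × Int × Int)), wins T len k ns = none := by
  have hw : ∀ n, wrTo T len n k = false := by
    intro n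
    unfold wrTo
    rw [Bool.and_eq_false_iff]
    right
    rw [List.any_eq_false]
    intro dd _
    simp only [decide_eq_true_eq]
    intro h
    exact absurd (pyIdx?_some_lt h) (by omega)
  intro ns
  induction ns with
  | nil => rfl
  | cons n ns ih => rw [wins_cons, ih, hw]; rfl

-- ---------- B side ----------

lemma length_altPaint (st : List (Option Int) × Int) (i m : Int) :
    (altPaint st i m).1.length = st.1.length := by
  unfold altPaint
  rcases h : PySem.List.pyGet? st.1 i with _ | v
  · rfl
  · cases v
    · simp [PySem.List.length_pySetD]
    · rfl

lemma get_altPaint (st : List (Option Int) × Int) (i m : Int) (k : Nat) :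
    (altPaint st i m).1[k]? =
      if PySem.List.pyIdx? st.1.length i = some k ∧ st.1[k]? = some none
      then some (some m) else st.1[k]? := by
  unfold altPaint
  rcases hg : PySem.List.pyGet? st.1 i with _ | v
  · rcases hi : PySem.List.pyIdx? st.1.length i with _ | j
    · simp [hi]
    · rw [pyGet?_eq_of_pyIdx hi] at hg
      have hj := pyIdx?_some_lt hi
      have := List.getElem?_eq_none_iff.mp hg
      omega
  · cases v with
    | none =>
      dsimp only
      rcases hi : PySem.List.pyIdx? st.1.length i with _ | j
      · rw [pyGet?_eq_none_of_pyIdx hi] at hg; exact absurd hg (by simp)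
      · rw [pyGet?_eq_of_pyIdx hi] at hg
        rw [pySetD_getElem?, hi]
        rcases eq_or_ne j k with rfl | hne
        · simp [hg]
        · have h1 : ¬ ((some j : Option Nat) = some k) := by simp [hne]
          simp [h1]
    | some v' =>
      dsimp only
      rcases hi : PySem.List.pyIdx? st.1.length i with _ | j
      · simp
      · rw [pyGet?_eq_of_pyIdx hi] at hg
        rcases eq_or_ne j k with rfl | hne
        · simp [hg]
        · have h1 : ¬ ((some j : Option Nat) = some k) := by simp [hne]
          simp [h1]

lemma countP_set_succ (m : Option Int) :
    ∀ (o : List (Option Int)) (j : Nat), o[j]? = some none → m.isSome →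
      (o.set j m).countP (fun v => v.isNone) + 1 = o.countP (fun v => v.isNone) := by
  intro o
  induction o with
  | nil => intro j h _; simp at h
  | cons x rest ih =>
    intro j h hm
    cases j with
    | zero =>
      simp at h
      subst h
      cases m with
      | none => simp at hm
      | some _ => simp
    | succ j =>
      simp at h
      have := ih j h hm
      simp only [List.set_cons_succ, List.countP_cons]
      omega

lemma cnt_altPaint (st : List (Option Int) × Int) (i m : Int)
    (h : st.2 = cN st.1) : (altPaint st i m).2 = cN (altPaint st i m).1 := by
  unfold altPaint
  rcases hg : PySem.List.pyGet? st.1 i with _ | v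
  · exact h
  · cases v with
    | none =>
      dsimp only
      rcases hi : PySem.List.pyIdx? st.1.length i with _ | j
      · rw [pyGet?_eq_none_of_pyIdx hi] at hg; exact absurd hg (by simp)
      · rw [pySetD_eq_set_of_pyIdx _ hi]
        rw [pyGet?_eq_of_pyIdx hi] at hg
        have hc := countP_set_succ (some m) st.1 j hg (by simp)
        unfold cN at *
        omega
    | some v' => exact h

lemma no_none_of_cN_zero {o : List (Option Int)} (h : cN o = 0) (k : Nat) :
    o[k]? ≠ some none := by
  intro hk
  have hmem : (none : Option Int) ∈ o := List.mem_of_getElem? hk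
  have h0 : o.countP (fun v => v.isNone) = 0 := by unfold cN at h; omega
  have := List.countP_eq_zero.mp h0 _ hmem
  simp at this

lemma innerB_len (s0 m : Int) :
    ∀ (ds : List Int) (st : List (Option Int) × Int),
      ((ds.foldl (fun s d => altPaint s (s0 + d) m) st).1).length = st.1.length := by
  intro ds
  induction ds with
  | nil => intro st; rfl
  | cons d ds ih => intro st; simp only [List.foldl_cons]; rw [ih, length_altPaint]

lemma innerB_cnt (s0 m : Int) :
    ∀ (ds : List Int) (st : List (Option Int) × Int), st.2 = cN st.1 →
      (ds.foldl (fun s d => altPaint s (s0 + d) m) st).2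
        = cN (ds.foldl (fun s d => altPaint s (s0 + d) m) st).1 := by
  intro ds
  induction ds with
  | nil => intro st h; exact h
  | cons d ds ih => intro st h; simp only [List.foldl_cons]; exact ih _ (cnt_altPaint _ _ _ h)

lemma innerB_get (s0 m : Int) :
    ∀ (ds : List Int) (st : List (Option Int) × Int) (k : Nat),
      ((ds.foldl (fun s d => altPaint s (s0 + d) m) st).1)[k]? =
        if (ds.any (fun dd => decide (PySem.List.pyIdx? st.1.length (s0 + dd) = some k)))
            ∧ st.1[k]? = some none
        then some (some m) else st.1[k]? := by
  intro ds
  induction ds with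
  | nil => intro st k; simp
  | cons d ds ih =>
    intro st k
    simp only [List.foldl_cons, List.any_cons]
    rw [ih]
    simp only [length_altPaint, get_altPaint]
    by_cases hidx : PySem.List.pyIdx? st.1.length (s0 + d) = some k <;>
      by_cases hnone : st.1[k]? = some none <;>
        by_cases ha : (ds.any fun dd => decide (PySem.List.pyIdx? st.1.length (s0 + dd) = some k)) = true <;>
          simp [hidx, hnone, ha]

lemma length_altNote (T : Int) (st : List (Option Int) × Int) (n : Int × Int × Int) :
    (altNote T st n).1.length = st.1.length := by
  unfold altNote
  split
  · rw [innerB_len, length_altPaint]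
  · rfl

lemma cnt_altNote (T : Int) (st : List (Option Int) × Int) (n : Int × Int × Int)
    (h : st.2 = cN st.1) : (altNote T st n).2 = cN (altNote T st n).1 := by
  unfold altNote
  split
  · exact innerB_cnt _ _ _ _ (cnt_altPaint _ _ _ h)
  · exact h

lemma get_altNote (T : Int) (st : List (Option Int) × Int) (n : Int × Int × Int) (k : Nat) :
    (altNote T st n).1[k]? =
      if wrTo T st.1.length n k ∧ st.1[k]? = some none
      then some (some n.2.1) else st.1[k]? := by
  unfold altNote wrTo
  by_cases hs : n.1 < T
  · simp only [if_pos hs]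
    rw [innerB_get]
    simp only [length_altPaint, get_altPaint, List.any_cons, add_zero]
    by_cases h0 : PySem.List.pyIdx? st.1.length n.1 = some k <;>
      by_cases hnone : st.1[k]? = some none <;>
        by_cases ha : ((PySem.List.pyRange 1 (min n.2.2 (T - n.1)) 1).any
            fun dd => decide (PySem.List.pyIdx? st.1.length (n.1 + dd) = some k)) = true <;>
          simp [hs, h0, hnone, ha]
  · simp [hs]

lemma altLoop_char (T : Int) :
    ∀ (ns : List (Int × Int × Int)) (st : List (Option Int) × Int) (k : Nat),
      st.2 = cN st.1 →
      (altLoop T ns st).1[k]? =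
        if st.1[k]? = some none then some (fw T st.1.length k ns) else st.1[k]? := by
  intro ns
  induction ns with
  | nil =>
    intro st k _
    by_cases h : st.1[k]? = some none <;> simp [altLoop, fw_nil, h]
  | cons n ns ih =>
    intro st k hcnt
    unfold altLoop
    split
    · rename_i hz
      have hc0 : cN st.1 = 0 := by omega
      have hnn := no_none_of_cN_zero hc0 k
      simp [hnn]
    · rw [ih _ _ (cnt_altNote T st n hcnt), length_altNote, get_altNote, fw_cons]
      by_cases hw : wrTo T st.1.length n k = true <;>
        by_cases hnone : st.1[k]? = some none <;> simp [hw, hnone]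

lemma fw_append (T : Int) (len : Nat) (k : Nat) :
    ∀ (xs ys : List (Int × Int × Int)),
      fw T len k (xs ++ ys) = (fw T len k xs).or (fw T len k ys) := by
  intro xs
  induction xs with
  | nil => intro ys; simp [fw_nil]
  | cons x xs ih =>
    intro ys
    simp only [List.cons_append, fw_cons]
    by_cases h : wrTo T len x k = true <;> simp [h, ih]

lemma fw_reverse_eq_wins (T : Int) (len : Nat) (k : Nat) :
    ∀ (ns : List (Int × Int × Int)), fw T len k ns.reverse = wins T len k ns := by
  intro ns
  induction ns with
  | nil => rfl
  | cons n ns ih =>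
    rw [List.reverse_cons, fw_append, ih, wins_cons, fw_cons, fw_nil]

-- ===== VERDICT (by name: the statement is the Claim_ definition above) =====
theorem theme_to_midi_sequence_spec : Claim_equal_theme_to_midi_sequence := by
  intro theme T _ _
  unfold Spec_theme_to_midi_sequence
  simp only [theme_to_midi_sequence, theme_to_midi_sequence_alt]
  apply List.ext_getElem?
  intro k
  rw [List.getElem?_map, foldA_char,
    altLoop_char T theme.reverse _ k (by unfold cN; simp [List.countP_replicate])]
  simp only [List.length_replicate]
  rw [fw_reverse_eq_wins]
  by_cases hk : k < T.toNat
  · cases hw : wins T T.toNat k theme <;> simp [List.getElem?_replicate, hk, hw]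
  · have h := wins_eq_none_of_le T T.toNat k (by omega) theme
    simp [List.getElem?_replicate, hk, h]
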